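-- pv_equiv track=rewrite | github.com/kyutai-labs/ARC-Encoder | embed_llm/models/embedding_modules.py | split_integer
-- ===== SOURCE A (Python) =====
-- def split_integer(x, n):
--     if n > 0:
--         # Split in n groupes of tokens
--         base = x // n
--         remainder = x % n
--         result = [base] * n
--         for i in range(remainder):
--             result[i] += 1
--         return result
--     else:
--         # Split in groups of n tokens
--         n = -n
--         base = x // n
--         remainder = x % n
--         result = [n] * base
--         if remainder > 0:
--             result.append(remainder)
--         assert sum(result) == x, (
--             f"Sum of result {sum(result)} must be equal to x {x} with n {n}"
--         )
--         return result
-- ===== SOURCE B (Python) =====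
-- def split_integer(x, n):
--     if n > 0:
--         # Greedy peeling: give the next group the ceiling of what is left over
--         # the remaining number of groups; no division-with-remainder, no blocks.
--         out = []
--         remaining = x
--         for k in range(n, 0, -1):
--             g = -((-remaining) // k)  # ceil(remaining / k)
--             out.append(g)
--             remaining -= g
--         return out
--     else:
--         # Repeated subtraction: peel off full groups of m tokens one at a time.
--         m = -n
--         out = []
--         r = x
--         while m > 0 and r >= m:
--             out.append(m)
--             r -= m
--         if r > 0:
--             out.append(r)
--         return out
-- ===== Notes on version B (the rewrite author's own statement) =====
-- stated objective: alternative
-- what changed: Instead of computing one divmod and materialising base/base+1 (resp. [n]-sized) blocks, B peels the answer off one element at a time: the n>0 branch greedily gives each group the ceiling of the remaining tokens over the remaining groups (no divmod of the whole x, no increment pass), and the else branch builds groups by repeated subtraction with no division at all.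
import Mathlib
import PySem

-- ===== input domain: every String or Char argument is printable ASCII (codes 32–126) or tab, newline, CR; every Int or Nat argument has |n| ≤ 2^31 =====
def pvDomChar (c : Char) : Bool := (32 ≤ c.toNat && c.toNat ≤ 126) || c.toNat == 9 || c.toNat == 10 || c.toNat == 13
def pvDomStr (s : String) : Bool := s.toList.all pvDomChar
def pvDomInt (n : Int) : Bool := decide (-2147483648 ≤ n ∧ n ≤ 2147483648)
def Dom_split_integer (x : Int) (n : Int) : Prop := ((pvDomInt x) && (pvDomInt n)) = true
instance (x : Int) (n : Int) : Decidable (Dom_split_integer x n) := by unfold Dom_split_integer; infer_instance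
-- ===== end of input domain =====

-- B replaces A's divmod-plus-fixup construction by element-at-a-time peeling:
-- greedy ceiling division per group in the n>0 branch, repeated subtraction in
-- the else branch (objective: alternative; same cost).

-- ===== PORT A =====
def split_integer (x : Int) (n : Int) : List Int :=
  if n > 0 then
    let base := PySem.Int.floordiv x n
    let remainder := PySem.Int.mod x n
    let result := List.replicate n.toNat base
    (PySem.List.pyRange 0 remainder 1).foldl
      (fun r i => r.set i.toNat (r.getD i.toNat 0 + 1)) result
  else
    let m := -n
    let base := PySem.Int.floordiv x m
    let remainder := PySem.Int.mod x m
    let result := List.replicate base.toNat m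
    -- the assert 'sum(result) == x' holds on every input admitted by Pre_ (it is
    -- what makes A raise on n < 0 with x < 0, which Pre_ excludes)
    if remainder > 0 then result ++ [remainder] else result

-- ===== PORT B =====
-- the for-loop over range(n, 0, -1): k counts the groups still to fill
def pvPeel (x : Int) : Nat → List Int
  | 0 => []
  | k + 1 =>
    let g := -(PySem.Int.floordiv (-x) ((k : Int) + 1))  -- ceil(x / k+1)
    g :: pvPeel (x - g) k

-- the while-loop 'while m > 0 and r >= m' followed by the trailing remainder
def pvChop (r : Int) (m : Int) : List Int :=
  if h : 0 < m ∧ m ≤ r then m :: pvChop (r - m) m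
  else if 0 < r then [r] else []
  termination_by r.toNat
  decreasing_by omega

def split_integer_alt (x : Int) (n : Int) : List Int :=
  if n > 0 then pvPeel x n.toNat
  else pvChop x (-n)

-- ===== PRECONDITION & SPEC =====
-- A raises outside Pre_: ZeroDivisionError at n = 0, and for n < 0 with x < 0 the
-- assert 'sum(result) == x' fails (AssertionError); Pre_ excludes exactly those.
def Pre_split_integer (x : Int) (n : Int) : Prop := n > 0 ∨ (n < 0 ∧ 0 ≤ x)
instance (x : Int) (n : Int) : Decidable (Pre_split_integer x n) := by unfold Pre_split_integer; infer_instance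
def pvWitness_split_integer : Int × Int := (7, 3)

def Spec_split_integer (x : Int) (n : Int) (out : List Int) : Prop := out = split_integer_alt x n
instance (x : Int) (n : Int) (out : List Int) : Decidable (Spec_split_integer x n out) := by unfold Spec_split_integer; infer_instance

-- ===== CLAIM (what is proved, stated in full; the proofs are below) =====
def Claim_equal_split_integer : Prop := ∀ (x : Int) (n : Int), Dom_split_integer x n → Pre_split_integer x n → Spec_split_integer x n (split_integer x n)

-- ===== LEMMAS AND PROOFS =====

-- incrementing positions 0..k-1 of [base]*n yields [base+1]*k ++ [base]*(n-k)
theorem pv_incr_loop (base : Int) (n k : Nat) (hk : k ≤ n) :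
    (PySem.List.pyRange 0 (k : Int) 1).foldl
      (fun r i => r.set i.toNat (r.getD i.toNat 0 + 1)) (List.replicate n base)
    = List.replicate k (base + 1) ++ List.replicate (n - k) base := by
  induction k with
  | zero => simp [PySem.List.pyRange_one_eq_nil]
  | succ k ih =>
    have hk' : k ≤ n := Nat.le_of_succ_le hk
    have hsplit : PySem.List.pyRange 0 ((k : Int) + 1) 1
        = PySem.List.pyRange 0 (k : Int) 1 ++ [(k : Int)] :=
      PySem.List.pyRange_one_succ_right (by positivity)
    have hcast : ((k + 1 : Nat) : Int) = (k : Int) + 1 := by push_cast; ring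
    rw [hcast, hsplit, List.foldl_append, ih hk']
    have hrep : List.replicate (n - k) base = base :: List.replicate (n - k - 1) base := by
      rw [← List.replicate_succ]
      congr 1
      omega
    simp only [List.foldl, Int.toNat_natCast]
    rw [hrep]
    have hget : (List.replicate k (base + 1) ++ base :: List.replicate (n - k - 1) base).getD k 0 = base := by
      rw [List.getD_append_right _ _ _ _ (by simp)]
      simp
    have hset : (List.replicate k (base + 1) ++ base :: List.replicate (n - k - 1) base).set k (base + 1)
        = List.replicate (k + 1) (base + 1) ++ List.replicate (n - (k + 1)) base := by
      rw [List.set_append, if_neg (by simp)]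
      simp only [List.length_replicate, Nat.sub_self, List.set_cons_zero,
        List.replicate_succ' (n := k), List.append_assoc, List.singleton_append]
      rw [Nat.sub_sub]
    rw [hget, hset]

-- greedy ceiling peeling over k+1 groups produces the base/base+1 blocks
theorem pv_peel_blocks (k : Nat) : ∀ x : Int,
    pvPeel x (k + 1)
    = List.replicate (PySem.Int.mod x ((k : Int) + 1)).toNat
        (PySem.Int.floordiv x ((k : Int) + 1) + 1)
      ++ List.replicate ((k + 1) - (PySem.Int.mod x ((k : Int) + 1)).toNat)
        (PySem.Int.floordiv x ((k : Int) + 1)) := by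
  induction k with
  | zero =>
    intro x
    have hb : PySem.Int.floordiv x 1 = x := by
      rw [PySem.Int.floordiv_eq_ediv_of_pos (by norm_num)]; simp
    have hm : PySem.Int.mod x 1 = 0 := by
      have := PySem.Int.floordiv_mul_add_mod x 1
      rw [hb] at this; omega
    have hc : PySem.Int.floordiv (-x) 1 = -x := by
      rw [PySem.Int.floordiv_eq_ediv_of_pos (by norm_num)]; simp
    simp only [pvPeel, Nat.cast_zero, zero_add, hb, hm, hc]
    simp
  | succ k ih =>
    intro x
    set N : Int := (k : Int) + 1 + 1 with hN
    have hNpos : 0 < N := by omega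
    set b := PySem.Int.floordiv x N with hbdef
    set r := PySem.Int.mod x N with hrdef
    have hsum : b * N + r = x := PySem.Int.floordiv_mul_add_mod x N
    have hr0 : 0 ≤ r := PySem.Int.mod_nonneg x hNpos
    have hrN : r < N := PySem.Int.mod_lt x hNpos
    -- the greedy group is the ceiling b + (1 if r > 0 else 0)
    have hg : -(PySem.Int.floordiv (-x) N) = b + (if 0 < r then 1 else 0) := by
      rw [PySem.Int.neg_floordiv_neg_eq_iff_of_pos hNpos]
      split_ifs with h <;> constructor <;> nlinarith
    have hNc : (((k + 1 : Nat) : Int) + 1) = N := by push_cast [hN]; ring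
    show (-(PySem.Int.floordiv (-x) ((k : Int) + 1 + 1))) ::
        pvPeel (x - -(PySem.Int.floordiv (-x) ((k : Int) + 1 + 1))) (k + 1) = _
    rw [hNc, ← hN, hg]
    by_cases h : 0 < r
    · rw [if_pos h]
      have hb' : PySem.Int.floordiv (x - (b + 1)) ((k : Int) + 1) = b := by
        rw [PySem.Int.floordiv_eq_iff_of_pos (by omega)]
        constructor <;> nlinarith
      have hr' : PySem.Int.mod (x - (b + 1)) ((k : Int) + 1) = r - 1 := by
        have := PySem.Int.floordiv_mul_add_mod (x - (b + 1)) ((k : Int) + 1)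
        rw [hb'] at this; nlinarith
      rw [ih (x - (b + 1)), hb', hr']
      have hrpos : r.toNat = (r - 1).toNat + 1 := by omega
      rw [hrpos, List.replicate_succ]
      simp only [List.cons_append]
      congr 3
      omega
    · rw [if_neg h]
      have hreq : r = 0 := by omega
      have hb' : PySem.Int.floordiv (x - (b + 0)) ((k : Int) + 1) = b := by
        rw [PySem.Int.floordiv_eq_iff_of_pos (by omega)]
        constructor <;> nlinarith
      have hr' : PySem.Int.mod (x - (b + 0)) ((k : Int) + 1) = 0 := by
        have := PySem.Int.floordiv_mul_add_mod (x - (b + 0)) ((k : Int) + 1)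
        rw [hb'] at this; nlinarith
      rw [ih (x - (b + 0)), hb', hr', ← hrdef, hreq]
      simp [List.replicate_succ]
      exact ⟨hbdef, Or.inr hbdef⟩

-- repeated subtraction produces the [m]*base ++ optional-remainder blocks
theorem pv_chop_blocks (m : Int) (hm : 0 < m) : ∀ t : Nat, ∀ x : Int, 0 ≤ x → x.toNat ≤ t →
    pvChop x m = List.replicate (PySem.Int.floordiv x m).toNat m
      ++ (if 0 < PySem.Int.mod x m then [PySem.Int.mod x m] else []) := by
  intro t
  induction t with
  | zero =>
    intro x hx ht
    have hx0 : x = 0 := by omega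
    subst hx0
    have hb0 : PySem.Int.floordiv 0 m = 0 := by
      rw [PySem.Int.floordiv_eq_iff_of_pos hm]
      constructor <;> nlinarith
    have hr0 : PySem.Int.mod 0 m = 0 := by
      have := PySem.Int.floordiv_mul_add_mod 0 m
      rw [hb0] at this; omega
    rw [pvChop, dif_neg (by omega), hb0, hr0]
    simp
  | succ t ih =>
    intro x hx ht
    set b := PySem.Int.floordiv x m with hbdef
    set r := PySem.Int.mod x m with hrdef
    have hsum : b * m + r = x := PySem.Int.floordiv_mul_add_mod x m
    have hr0 : 0 ≤ r := PySem.Int.mod_nonneg x hm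
    have hrm : r < m := PySem.Int.mod_lt x hm
    by_cases h : m ≤ x
    · have hb1 : 1 ≤ b := by
        by_contra hb
        push_neg at hb
        nlinarith
      have hb' : PySem.Int.floordiv (x - m) m = b - 1 := by
        rw [PySem.Int.floordiv_eq_iff_of_pos hm]
        constructor <;> nlinarith
      have hr' : PySem.Int.mod (x - m) m = r := by
        have := PySem.Int.floordiv_mul_add_mod (x - m) m
        rw [hb'] at this; nlinarith
      rw [pvChop, dif_pos ⟨hm, h⟩, ih (x - m) (by omega) (by omega), hb', hr']
      have hbt : b.toNat = (b - 1).toNat + 1 := by omega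
      rw [hbt, List.replicate_succ]
      simp
    · push_neg at h
      have hb0 : b = 0 := by
        rw [hbdef, PySem.Int.floordiv_eq_iff_of_pos hm]
        constructor <;> nlinarith
      have hr' : r = x := by nlinarith
      rw [pvChop, dif_neg (by omega), hb0, hr']
      simp

-- ===== VERDICT (by name: the statement is the Claim_ definition above) =====
theorem split_integer_spec : Claim_equal_split_integer := by
  intro x n _ hpre
  unfold Spec_split_integer split_integer split_integer_alt
  by_cases hn : n > 0
  · simp only [hn, if_pos]
    obtain ⟨k, hk⟩ : ∃ k : Nat, n.toNat = k + 1 := ⟨n.toNat - 1, by omega⟩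
    have hcastn : ((k : Int) + 1) = n := by omega
    rw [hk, pv_peel_blocks k x, hcastn]
    have hmod := PySem.Int.mod_nonneg x hn
    have hmlt := PySem.Int.mod_lt x hn
    have hc : (((PySem.Int.mod x n).toNat : Nat) : Int) = PySem.Int.mod x n := by omega
    rw [← hc, pv_incr_loop _ _ _ (by omega)]
    simp only [Int.toNat_natCast]
  · rcases hpre with h | ⟨hneg, hx⟩
    · omega
    · simp only [hn, if_false]
      rw [pv_chop_blocks (-n) (by omega) x.toNat x hx le_rfl]
      split_ifs with h <;> simp
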